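-- pv_equiv track=rewrite | github.com/GIST-DSLab/ARC_Prompt | Productivity/utils.py | remove_except
-- ===== SOURCE A (Python) =====
-- def remove_except(input_str, exception_chars='0123456789[], '):
--     inside_brackets = False
--     result = []
--     for char in input_str:
--         if char == '[':
--             inside_brackets = True
--         elif char == ']':
--             inside_brackets = False
--         if inside_brackets or char in exception_chars:
--             result.append(char)
--     return ''.join(result)
-- ===== SOURCE B (Python) =====
-- def remove_except(input_str, exception_chars='0123456789[], '):
--     # Segment-based: split at '[' so each later segment starts a bracketed region;
--     # within a segment, partition at the first ']' ends the region.
--     segs = input_str.split('[')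
--     parts = [''.join(c for c in segs[0] if c in exception_chars)]
--     for seg in segs[1:]:
--         head, sep, tail = seg.partition(']')
--         parts.append('[' + head + ''.join(c for c in sep + tail if c in exception_chars))
--     return ''.join(parts)
-- ===== Notes on version B (the rewrite author's own statement) =====
-- stated objective: alternative
-- what changed: B replaces A's per-character bracket-flag loop with a segment algorithm: split the string at '[', keep the first segment filtered by the allowed set, and for each later segment keep '[' plus the part up to the first ']' whole and filter the remainder.
import Mathlib
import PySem

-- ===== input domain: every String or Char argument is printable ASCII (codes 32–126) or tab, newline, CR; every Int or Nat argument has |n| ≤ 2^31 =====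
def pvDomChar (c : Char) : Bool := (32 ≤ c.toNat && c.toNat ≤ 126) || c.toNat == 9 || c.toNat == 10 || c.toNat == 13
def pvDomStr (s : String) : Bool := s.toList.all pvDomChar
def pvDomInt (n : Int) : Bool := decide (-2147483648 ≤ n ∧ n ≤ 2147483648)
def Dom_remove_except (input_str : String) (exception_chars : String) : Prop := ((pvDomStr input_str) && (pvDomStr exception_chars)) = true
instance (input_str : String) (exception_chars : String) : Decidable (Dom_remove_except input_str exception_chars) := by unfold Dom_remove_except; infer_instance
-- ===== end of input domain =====

-- B replaces A's per-character bracket flag with a segment algorithm: split at '[',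
-- keep each bracketed head up to the first ']' whole, filter the rest (objective: alternative).

-- ===== PORT A =====
-- A's loop body: carry (inside_brackets, result) and append kept characters.
def pvStepA (exc : List Char) (st : Bool × List Char) (char : Char) : Bool × List Char :=
  let inside := if char = '[' then true else if char = ']' then false else st.1
  (inside, if inside || exc.contains char then st.2 ++ [char] else st.2)

def remove_except (input_str : String) (exception_chars : String) : String :=
  let st := input_str.toList.foldl (pvStepA exception_chars.toList) (false, [])
  String.ofList st.2

-- ===== PORT B =====
-- input_str.split('['): split the character list at every '['.
def pvSplitLB : List Char → List (List Char)
  | [] => [[]]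
  | c :: t =>
      if c = '[' then [] :: pvSplitLB t
      else
        match pvSplitLB t with
        | [] => [[c]]
        | s :: r => (c :: s) :: r

-- per-segment output: '[' + head-before-first-']' kept whole + the rest filtered
-- (seg.partition(']') is List.span (· ≠ ']'); sep+tail is exactly the span's second part).
def pvSegOut (exc : List Char) (seg : List Char) : List Char :=
  let p := seg.span (fun c => c ≠ ']')
  '[' :: p.1 ++ p.2.filter (fun c => exc.contains c)

def remove_except_alt (input_str : String) (exception_chars : String) : String :=
  let exc := exception_chars.toList
  match pvSplitLB input_str.toList with
  | [] => ""
  | s0 :: rest =>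
      String.ofList (s0.filter (fun c => exc.contains c) ++ rest.flatMap (pvSegOut exc))

-- ===== PRECONDITION & SPEC =====
def Spec_remove_except (input_str : String) (exception_chars : String) (out : String) : Prop := out = remove_except_alt input_str exception_chars
instance (input_str : String) (exception_chars : String) (out : String) : Decidable (Spec_remove_except input_str exception_chars out) := by unfold Spec_remove_except; infer_instance

-- ===== CLAIM (what is proved, stated in full; the proofs are below) =====
def Claim_equal_remove_except : Prop := ∀ (input_str : String) (exception_chars : String), Dom_remove_except input_str exception_chars → Spec_remove_except input_str exception_chars (remove_except input_str exception_chars)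

-- ===== LEMMAS AND PROOFS =====

-- pvStepA on the three kinds of character.
theorem pv_step_rb (exc : List Char) (b : Bool) (acc : List Char) :
    pvStepA exc (b, acc) ']' = (false, if exc.contains ']' then acc ++ [']'] else acc) := by
  simp [pvStepA]

theorem pv_step_lb (exc : List Char) (b : Bool) (acc : List Char) :
    pvStepA exc (b, acc) '[' = (true, acc ++ ['[']) := by
  simp [pvStepA]

theorem pv_step_out (exc : List Char) {c : Char} (hc : c ≠ '[') (hr : c ≠ ']') (acc : List Char) :
    pvStepA exc (false, acc) c = (false, if exc.contains c then acc ++ [c] else acc) := by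
  simp [pvStepA, hc, hr]

theorem pv_step_in (exc : List Char) {c : Char} (hr : c ≠ ']') (acc : List Char) :
    pvStepA exc (true, acc) c = (true, acc ++ [c]) := by
  by_cases hc : c = '['
  · simp [pvStepA, hc]
  · simp [pvStepA, hc, hr]

-- A's fold over a '['-free list from the outside state just filters by exc.
theorem pv_fold_noLB (exc : List Char) :
    ∀ (cs : List Char), '[' ∉ cs → ∀ acc,
    cs.foldl (pvStepA exc) (false, acc) = (false, acc ++ cs.filter (fun c => exc.contains c)) := by
  intro cs
  induction cs with
  | nil => intro _ acc; simp
  | cons c t ih =>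
      intro h acc
      have hc : c ≠ '[' := fun he => h (he ▸ List.mem_cons_self)
      have ht : '[' ∉ t := fun hm => h (List.mem_cons_of_mem _ hm)
      rw [List.foldl_cons]
      by_cases hr : c = ']'
      · subst hr
        rw [pv_step_rb, ih ht, List.filter_cons]
        split_ifs with hk <;> simp
      · rw [pv_step_out exc hc hr, ih ht, List.filter_cons]
        split_ifs with hk <;> simp

-- A's fold over a '['-free segment from the inside state keeps the span head whole
-- and filters from the first ']' on.
theorem pv_fold_seg (exc : List Char) :
    ∀ (seg : List Char), '[' ∉ seg → ∀ acc, ∃ b,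
    seg.foldl (pvStepA exc) (true, acc)
      = (b, acc ++ (seg.span (fun c => c ≠ ']')).1
              ++ (seg.span (fun c => c ≠ ']')).2.filter (fun c => exc.contains c)) := by
  intro seg
  induction seg with
  | nil => intro _ acc; exact ⟨true, by simp⟩
  | cons c t ih =>
      intro h acc
      have hc : c ≠ '[' := fun he => h (he ▸ List.mem_cons_self)
      have ht : '[' ∉ t := fun hm => h (List.mem_cons_of_mem _ hm)
      by_cases hr : c = ']'
      · subst hr
        refine ⟨false, ?_⟩
        rw [List.foldl_cons, pv_step_rb, pv_fold_noLB exc t ht]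
        simp only [List.span_eq_takeWhile_dropWhile, List.takeWhile_cons, List.dropWhile_cons]
        norm_num
        rw [List.filter_cons]
        split_ifs <;> simp_all
      · obtain ⟨b, hb⟩ := ih ht (acc ++ [c])
        refine ⟨b, ?_⟩
        rw [List.foldl_cons, pv_step_in exc hr, hb]
        simp only [List.span_eq_takeWhile_dropWhile, List.takeWhile_cons, List.dropWhile_cons]
        simp [hr]

-- A's fold over '[' :: seg appends pvSegOut, from any starting state.
theorem pv_fold_lbseg (exc : List Char) (seg : List Char) (h : '[' ∉ seg)
    (b : Bool) (acc : List Char) : ∃ b',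
    ('[' :: seg).foldl (pvStepA exc) (b, acc) = (b', acc ++ pvSegOut exc seg) := by
  obtain ⟨b', hb⟩ := pv_fold_seg exc seg h (acc ++ ['['])
  refine ⟨b', ?_⟩
  rw [List.foldl_cons, pv_step_lb, hb]
  simp [pvSegOut]

-- A's fold over the flattened bracketed segments appends their pvSegOut's.
theorem pv_fold_rest (exc : List Char) :
    ∀ (rest : List (List Char)), (∀ s ∈ rest, '[' ∉ s) → ∀ (b : Bool) (acc : List Char),
    ((rest.flatMap (fun s => '[' :: s)).foldl (pvStepA exc) (b, acc)).2
      = acc ++ rest.flatMap (pvSegOut exc) := by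
  intro rest
  induction rest with
  | nil => intro _ b acc; simp
  | cons s r ih =>
      intro h b acc
      have hs : '[' ∉ s := h s List.mem_cons_self
      have hr : ∀ x ∈ r, '[' ∉ x := fun x hx => h x (List.mem_cons_of_mem _ hx)
      obtain ⟨b', hb⟩ := pv_fold_lbseg exc s hs b acc
      simp only [List.flatMap_cons, List.foldl_append, hb]
      rw [ih hr b' (acc ++ pvSegOut exc s)]
      simp

-- pvSplitLB is nonempty, reassembles to the input, and produces '['-free segments.
theorem pv_split_spec :
    ∀ (cs : List Char), ∃ s0 rest, pvSplitLB cs = s0 :: rest ∧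
      cs = s0 ++ rest.flatMap (fun s => '[' :: s) ∧ '[' ∉ s0 ∧ ∀ s ∈ rest, '[' ∉ s := by
  intro cs
  induction cs with
  | nil => exact ⟨[], [], rfl, by simp, by simp, by simp⟩
  | cons c t ih =>
      obtain ⟨s0, rest, he, hj, h0, hr⟩ := ih
      by_cases hc : c = '['
      · subst hc
        refine ⟨[], s0 :: rest, ?_, ?_, by simp, ?_⟩
        · simp [pvSplitLB, he]
        · simp [hj]
        · intro s hs
          rcases List.mem_cons.mp hs with h | h
          · exact h ▸ h0
          · exact hr s h
      · refine ⟨c :: s0, rest, ?_, by simp [hj], ?_, hr⟩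
        · simp [pvSplitLB, if_neg hc, he]
        · intro hm
          rcases List.mem_cons.mp hm with h | h
          · exact hc h.symm
          · exact h0 h

-- ===== VERDICT (by name: the statement is the Claim_ definition above) =====
theorem remove_except_spec : Claim_equal_remove_except := by
  intro input_str exception_chars _
  unfold Spec_remove_except remove_except remove_except_alt
  obtain ⟨s0, rest, he, hj, h0, hr⟩ := pv_split_spec input_str.toList
  simp only [he]
  rw [hj, List.foldl_append]
  rw [pv_fold_noLB exception_chars.toList s0 h0 []]
  rw [pv_fold_rest exception_chars.toList rest hr false
        (([] : List Char) ++ s0.filter (fun c => exception_chars.toList.contains c))]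
  simp
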